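-- pv_equiv track=rewrite | github.com/jimchurches/myebirdstuff | personal_ebird_explorer/checklist_stats_display.py | _yearly_ordered_detail_rows
-- ===== SOURCE A (Python) =====
-- from typing import Any, Callable, Dict, List, Optional, Tuple
--
-- def _yearly_short_name(full_label: str, prefix: str) -> str:
--     name = full_label.strip()
--     if name.startswith(prefix):
--         name = name[len(prefix) :].strip()
--     if " <span" in name:
--         name = name.split(" <span")[0].strip()
--     return name or full_label
--
-- def _yearly_ordered_detail_rows(
--     detail_rows: List[Tuple[str, List[str]]],
--     order_list: List[str],
--     prefix: str,
--     years_list: List[Any],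
-- ) -> List[Tuple[str, List[str]]]:
--     by_suffix: Dict[str, List[str]] = {}
--     for label, vals in detail_rows:
--         short = _yearly_short_name(label, prefix)
--         by_suffix[short] = vals
--     return [(name, by_suffix.get(name, ["—"] * len(years_list))) for name in order_list if name in by_suffix]
-- ===== SOURCE B (Python) =====
-- from typing import Any, List, Tuple
--
--
-- def _yearly_short_name(full_label: str, prefix: str) -> str:
--     name = full_label.strip()
--     if name.startswith(prefix):
--         name = name[len(prefix) :].strip()
--     if " <span" in name:
--         name = name.split(" <span")[0].strip()
--     return name or full_label
--
--
-- def _yearly_ordered_detail_rows(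
--     detail_rows: List[Tuple[str, List[str]]],
--     order_list: List[str],
--     prefix: str,
--     years_list: List[Any],
-- ) -> List[Tuple[str, List[str]]]:
--     # No prehashed index: for each requested name, scan the rows directly and
--     # keep the LAST row whose short name matches (dict overwrite semantics);
--     # names with no matching row are dropped.
--     result: List[Tuple[str, List[str]]] = []
--     for name in order_list:
--         found = None
--         for label, vals in detail_rows:
--             if _yearly_short_name(label, prefix) == name:
--                 found = vals
--         if found is not None:
--             result.append((name, found))
--     return result
-- ===== Notes on version B (the rewrite author's own statement) =====
-- stated objective: alternative
-- what changed: Replaces A's build-a-dict-then-comprehension (hash index keyed by short name, lookup per requested name) with a direct nested scan: for each name in order_list, rescan detail_rows keeping the last row whose short name matches, appending only when found.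
import Mathlib
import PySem

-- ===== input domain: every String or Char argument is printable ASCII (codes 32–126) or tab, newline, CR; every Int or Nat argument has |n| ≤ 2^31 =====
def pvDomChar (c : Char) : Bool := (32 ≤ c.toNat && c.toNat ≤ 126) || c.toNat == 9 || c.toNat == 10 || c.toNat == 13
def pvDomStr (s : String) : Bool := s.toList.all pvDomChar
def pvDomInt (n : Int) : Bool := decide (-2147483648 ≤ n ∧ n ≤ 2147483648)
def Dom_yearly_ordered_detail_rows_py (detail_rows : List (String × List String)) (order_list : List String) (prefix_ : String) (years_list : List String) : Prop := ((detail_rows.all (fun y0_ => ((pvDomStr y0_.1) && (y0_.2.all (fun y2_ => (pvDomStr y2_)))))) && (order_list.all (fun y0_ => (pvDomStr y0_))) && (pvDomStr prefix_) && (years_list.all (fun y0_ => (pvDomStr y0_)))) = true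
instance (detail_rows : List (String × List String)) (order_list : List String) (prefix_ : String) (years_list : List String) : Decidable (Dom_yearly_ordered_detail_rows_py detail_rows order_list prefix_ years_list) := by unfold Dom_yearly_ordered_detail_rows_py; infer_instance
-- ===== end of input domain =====

-- B drops A's prehashed short-name dict and instead, per requested name, rescans the rows
-- keeping the last match (alternative decomposition, same return value).

-- ===== PORT A =====
-- shared helper: port of _yearly_short_name (used by both Pythons verbatim)
def yearly_short_name (full_label : String) (prefix_ : String) : String :=
  let name := PySem.Str.strip full_label
  let name := if PySem.Str.startswith name prefix_ then
                PySem.Str.strip (PySem.Str.slice name (some (PySem.Str.len prefix_)) none)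
              else name
  let name := if PySem.Str.isIn " <span" name then
                PySem.Str.strip (((PySem.Str.split? name " <span").getD []).headD "")
              else name
  if name = "" then full_label else name

def yearly_ordered_detail_rows_py (detail_rows : List (String × List String)) (order_list : List String) (prefix_ : String) (years_list : List String) : List (String × List String) :=
  let by_suffix : PySem.Dict String (List String) :=
    detail_rows.foldl (fun d lv => d.insert (yearly_short_name lv.1 prefix_) lv.2) PySem.Dict.empty
  order_list.filterMap (fun name =>
    if by_suffix.contains name then
      some (name, by_suffix.getD name (List.replicate years_list.length "—"))
    else none)

-- ===== PORT B =====
-- inner loop of B: last row of detail_rows whose short name equals name (None if no match)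
def alt_find_last (detail_rows : List (String × List String)) (prefix_ : String) (name : String) : Option (List String) :=
  detail_rows.foldl (fun found lv => if yearly_short_name lv.1 prefix_ == name then some lv.2 else found) none

def yearly_ordered_detail_rows_py_alt (detail_rows : List (String × List String)) (order_list : List String) (prefix_ : String) (years_list : List String) : List (String × List String) :=
  match order_list with
  | [] => []
  | name :: rest =>
      match alt_find_last detail_rows prefix_ name with
      | some vals => (name, vals) :: yearly_ordered_detail_rows_py_alt detail_rows rest prefix_ years_list
      | none => yearly_ordered_detail_rows_py_alt detail_rows rest prefix_ years_list

-- ===== PRECONDITION & SPEC =====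
def Spec_yearly_ordered_detail_rows_py (detail_rows : List (String × List String)) (order_list : List String) (prefix_ : String) (years_list : List String) (out : List (String × List String)) : Prop := out = yearly_ordered_detail_rows_py_alt detail_rows order_list prefix_ years_list
instance (detail_rows : List (String × List String)) (order_list : List String) (prefix_ : String) (years_list : List String) (out : List (String × List String)) : Decidable (Spec_yearly_ordered_detail_rows_py detail_rows order_list prefix_ years_list out) := by unfold Spec_yearly_ordered_detail_rows_py; infer_instance

-- ===== CLAIM (what is proved, stated in full; the proofs are below) =====
def Claim_equal_yearly_ordered_detail_rows_py : Prop := ∀ (detail_rows : List (String × List String)) (order_list : List String) (prefix_ : String) (years_list : List String), Dom_yearly_ordered_detail_rows_py detail_rows order_list prefix_ years_list → Spec_yearly_ordered_detail_rows_py detail_rows order_list prefix_ years_list (yearly_ordered_detail_rows_py detail_rows order_list prefix_ years_list)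

-- ===== LEMMAS AND PROOFS =====

/-- A's dict lookup after the insertion loop equals B's "last matching row" scan. -/
lemma get?_foldl_insert_eq_find_last (rows : List (String × List String)) (prefix_ name : String)
    (d : PySem.Dict String (List String)) :
    (rows.foldl (fun d lv => d.insert (yearly_short_name lv.1 prefix_) lv.2) d).get? name
      = rows.foldl (fun found lv => if yearly_short_name lv.1 prefix_ == name then some lv.2 else found) (d.get? name) := by
  induction rows generalizing d with
  | nil => rfl
  | cons lv rest ih =>
      simp only [List.foldl_cons, ih]
      congr 1
      rw [PySem.Dict.get?_insert]
      by_cases h : yearly_short_name lv.1 prefix_ = name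
      · rw [if_pos h.symm, if_pos (beq_iff_eq.mpr h)]
      · rw [if_neg (fun e => h e.symm), if_neg (by simp [h])]

lemma alt_eq_filterMap (detail_rows : List (String × List String)) (order_list : List String)
    (prefix_ : String) (years_list : List String) :
    yearly_ordered_detail_rows_py_alt detail_rows order_list prefix_ years_list
      = order_list.filterMap (fun name => (alt_find_last detail_rows prefix_ name).map (fun vals => (name, vals))) := by
  induction order_list with
  | nil => rfl
  | cons name rest ih =>
      rw [yearly_ordered_detail_rows_py_alt, List.filterMap_cons]
      cases h : alt_find_last detail_rows prefix_ name <;> simp [ih]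

-- ===== VERDICT (by name: the statement is the Claim_ definition above) =====
theorem yearly_ordered_detail_rows_py_spec : Claim_equal_yearly_ordered_detail_rows_py := by
  intro detail_rows order_list prefix_ years_list _
  unfold Spec_yearly_ordered_detail_rows_py
  rw [alt_eq_filterMap, yearly_ordered_detail_rows_py]
  apply List.filterMap_congr
  intro name _
  have hd := get?_foldl_insert_eq_find_last detail_rows prefix_ name PySem.Dict.empty
  rw [PySem.Dict.get?_empty] at hd
  have hfind : alt_find_last detail_rows prefix_ name
      = (detail_rows.foldl (fun d lv => d.insert (yearly_short_name lv.1 prefix_) lv.2) PySem.Dict.empty).get? name := by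
    rw [alt_find_last, hd]
  cases hg : (detail_rows.foldl (fun d lv => d.insert (yearly_short_name lv.1 prefix_) lv.2) PySem.Dict.empty).get? name with
  | none =>
      have hc := PySem.Dict.contains_eq_isSome_get? (d := detail_rows.foldl (fun d lv => d.insert (yearly_short_name lv.1 prefix_) lv.2) PySem.Dict.empty) (k := name)
      rw [hg] at hc
      simp [hfind, hg, hc]
  | some v =>
      have hc := PySem.Dict.contains_eq_isSome_get? (d := detail_rows.foldl (fun d lv => d.insert (yearly_short_name lv.1 prefix_) lv.2) PySem.Dict.empty) (k := name)
      rw [hg] at hc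
      simp [hfind, hg, hc, PySem.Dict.getD_eq_get?_getD]
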